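-- pv_equiv track=rewrite | github.com/Mart1n66/school | python/fundamentals/matice.5.py | F
-- ===== SOURCE A (Python) =====
-- def F(A):
--     pocet = 0
--     pocet_nul = 0
--     for j in range(len(A[0])):
--         for i in range(len(A)):
--             if A[i][j] == 0:
--                 pocet_nul += 1
--             if pocet_nul == len(A):
--                 pocet += 1
--         pocet_nul = 0
--     return pocet
-- ===== SOURCE B (Python) =====
-- def F(A):
--     # Row-major sweep: keep the set of column indices still all-zero so far.
--     alive = list(range(len(A[0])))
--     for row in A:
--         alive = [j for j in alive if row[j] == 0]
--     return len(alive)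
-- ===== Notes on version B (the rewrite author's own statement) =====
-- stated objective: faster
-- what changed: Inverted the traversal: instead of column-major nested loops with a zero-counter compared to len(A), B sweeps the rows once, maintaining a shrinking list of candidate column indices that are still all-zero, and returns the number of survivors; columns pruned early are never inspected again.
import Mathlib
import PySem

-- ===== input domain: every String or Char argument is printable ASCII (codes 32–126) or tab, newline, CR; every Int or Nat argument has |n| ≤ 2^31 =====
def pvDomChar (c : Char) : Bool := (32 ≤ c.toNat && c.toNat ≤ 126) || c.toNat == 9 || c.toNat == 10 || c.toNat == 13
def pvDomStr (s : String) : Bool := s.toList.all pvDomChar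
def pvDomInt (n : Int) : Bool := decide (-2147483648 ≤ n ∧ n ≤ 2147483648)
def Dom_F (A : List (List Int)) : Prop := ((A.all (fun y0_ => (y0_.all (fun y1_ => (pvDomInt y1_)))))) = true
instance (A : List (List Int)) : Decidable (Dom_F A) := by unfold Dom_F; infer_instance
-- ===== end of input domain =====

-- B inverts the traversal: a single row-major sweep over A maintaining the shrinking list of
-- column indices still all-zero, instead of A's column-major nested loops with a zero-counter.

-- ===== PORT A =====
-- Python A: for j in range(len(A[0])): for i in range(len(A)): count zeros; bump pocet when the
-- counter hits len(A); reset the counter after each column. A[0] and A[i][j] raise IndexError on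
-- empty / ragged input — those inputs are outside Pre_F, so pyGetD's defaults are never relevant.
def F (A : List (List Int)) : Int :=
  (PySem.List.pyRange 0 (PySem.List.len (PySem.List.pyGetD A 0 [])) 1).foldl
    (fun pocet j =>
      ((PySem.List.pyRange 0 (PySem.List.len A) 1).foldl
        (fun (st : Int × Int) i =>
          let pocet_nul := if PySem.List.pyGetD (PySem.List.pyGetD A i []) j 0 = 0 then st.2 + 1 else st.2
          let pocet' := if pocet_nul = PySem.List.len A then st.1 + 1 else st.1
          (pocet', pocet_nul))
        (pocet, 0)).1)
    0

-- ===== PORT B =====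
-- Python B: alive = list(range(len(A[0]))); for row in A: alive = [j for j in alive if row[j] == 0];
-- return len(alive). row[j] raises only outside Pre_F, so pyGetD's default is never relevant.
def F_alt (A : List (List Int)) : Int :=
  PySem.List.len
    (A.foldl
      (fun (alive : List Int) row => alive.filter (fun j => PySem.List.pyGetD row j 0 == 0))
      (PySem.List.pyRange 0 (PySem.List.len (PySem.List.pyGetD A 0 [])) 1))

-- ===== PRECONDITION & SPEC =====
-- Pre_F excludes exactly the inputs on which Python A raises IndexError: the empty matrix (A[0])
-- and ragged matrices with a row shorter than row 0 (A[i][j]).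
def Pre_F (A : List (List Int)) : Prop :=
  A ≠ [] ∧ ∀ row ∈ A, (A.headD []).length ≤ row.length
instance (A : List (List Int)) : Decidable (Pre_F A) := by unfold Pre_F; infer_instance

def pvWitness_F : List (List Int) := [[0, 1, 0], [0, 0, 0]]

def Spec_F (A : List (List Int)) (out : Int) : Prop := out = F_alt A
instance (A : List (List Int)) (out : Int) : Decidable (Spec_F A out) := by unfold Spec_F; infer_instance

-- ===== CLAIM (what is proved, stated in full; the proofs are below) =====
def Claim_equal_F : Prop := ∀ (A : List (List Int)), Dom_F A → Pre_F A → Spec_F A (F A)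

-- ===== LEMMAS AND PROOFS =====

-- A's inner loop over the rows L, entered with zero-counter c, bumps pocet exactly once — at the
-- last row — iff L is nonempty, every row of L has a zero in column j, and the counter then hits n.
theorem inner_loop_eq (n j : Int) (L : List (List Int)) (p c : Int)
    (h : c + (L.length : Int) ≤ n) :
    (L.foldl
      (fun (st : Int × Int) row =>
        let pocet_nul := if PySem.List.pyGetD row j 0 = 0 then st.2 + 1 else st.2
        let pocet' := if pocet_nul = n then st.1 + 1 else st.1
        (pocet', pocet_nul))
      (p, c)).1 =
    if L ≠ [] ∧ c + (L.length : Int) = n ∧ (L.all fun row => PySem.List.pyGetD row j 0 == 0) = true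
    then p + 1 else p := by
  induction L generalizing p c with
  | nil => simp
  | cons row rest ih =>
      simp only [List.foldl_cons, List.all_cons]
      by_cases hz : PySem.List.pyGetD row j 0 = 0
      · simp only [if_pos hz]
        by_cases hfin : c + 1 = n
        · have hrest : rest = [] := by
            cases rest with
            | nil => rfl
            | cons a t => exfalso; simp at h; omega
          subst hrest
          simp [hfin, hz]
        · rw [if_neg hfin]
          rw [ih p (c + 1) (by simp at h ⊢; omega)]
          have hiff : (rest ≠ [] ∧ c + 1 + (rest.length : Int) = n ∧
                (rest.all fun row => PySem.List.pyGetD row j 0 == 0) = true) ↔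
              (row :: rest ≠ [] ∧ c + ((row :: rest).length : Int) = n ∧
                ((PySem.List.pyGetD row j 0 == 0) && rest.all fun row => PySem.List.pyGetD row j 0 == 0) = true) := by
            cases rest with
            | nil => simp; omega
            | cons a t => simp [hz]; intros; omega
          by_cases hc : rest ≠ [] ∧ c + 1 + (rest.length : Int) = n ∧
              (rest.all fun row => PySem.List.pyGetD row j 0 == 0) = true
          · rw [if_pos hc, if_pos (hiff.mp hc)]
          · rw [if_neg hc, if_neg (fun hh => hc (hiff.mpr hh))]
      · have hcn : ¬ c = n := by simp at h; omega
        simp only [if_neg hz, if_neg hcn]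
        rw [ih p c (by simp at h ⊢; omega)]
        have h1 : ¬ (row :: rest ≠ [] ∧ c + ((row :: rest).length : Int) = n ∧
            ((PySem.List.pyGetD row j 0 == 0) && rest.all fun row => PySem.List.pyGetD row j 0 == 0) = true) := by
          intro ⟨_, _, hb⟩
          simp [hz] at hb
        have h2 : ¬ (rest ≠ [] ∧ c + (rest.length : Int) = n ∧
            (rest.all fun row => PySem.List.pyGetD row j 0 == 0) = true) := by
          intro ⟨hne, he, _⟩
          cases rest with
          | nil => exact hne rfl
          | cons a t => simp at h he; omega
        rw [if_neg h2, if_neg h1]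

-- Per column j of a nonempty matrix, A's inner loop contributes exactly the 0/1 all-zero test.
theorem step_eq (A : List (List Int)) (hA : A ≠ []) (p j : Int) :
    ((PySem.List.pyRange 0 (PySem.List.len A) 1).foldl
      (fun (st : Int × Int) i =>
        let pocet_nul := if PySem.List.pyGetD (PySem.List.pyGetD A i []) j 0 = 0 then st.2 + 1 else st.2
        let pocet' := if pocet_nul = PySem.List.len A then st.1 + 1 else st.1
        (pocet', pocet_nul))
      (p, 0)).1 =
    if (A.all fun row => PySem.List.pyGetD row j 0 == 0) then p + 1 else p := by
  have h := PySem.List.foldl_pyRange_pyGetD A ([] : List Int)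
    (fun (st : Int × Int) row =>
      let pocet_nul := if PySem.List.pyGetD row j 0 = 0 then st.2 + 1 else st.2
      let pocet' := if pocet_nul = PySem.List.len A then st.1 + 1 else st.1
      (pocet', pocet_nul))
    (p, 0) (a := 0) (by omega)
  simp only [Int.toNat_zero, List.drop_zero] at h
  refine Eq.trans (congrArg Prod.fst h) ?_
  rw [inner_loop_eq (PySem.List.len A) j A p 0 (by simp [PySem.List.len_eq])]
  simp [PySem.List.len_eq, hA]

-- A's outer loop counts, over any index list R, the columns passing the all-zero test.
theorem count_fold_eq (P : Int → Bool) (R : List Int) (c : Int) :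
    R.foldl (fun c j => if P j then c + 1 else c) c =
      c + ((R.filter P).length : Int) := by
  induction R generalizing c with
  | nil => simp
  | cons j rest ih =>
      by_cases hp : P j = true
      · simp [List.foldl_cons, hp, ih]; omega
      · simp [List.foldl_cons, hp, ih]

-- B's repeated filtering over the rows equals one filter by the conjunction of the row tests.
theorem filter_fold_eq (A : List (List Int)) (R : List Int) :
    A.foldl (fun (alive : List Int) row => alive.filter (fun j => PySem.List.pyGetD row j 0 == 0)) R =
      R.filter (fun j => A.all fun row => PySem.List.pyGetD row j 0 == 0) := by
  induction A generalizing R with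
  | nil => simp
  | cons row rest ih =>
      simp only [List.foldl_cons, ih, List.filter_filter, List.all_cons]
      apply List.filter_congr
      intro j _
      simp [Bool.and_comm]

-- ===== VERDICT (by name: the statement is the Claim_ definition above) =====
theorem F_spec : Claim_equal_F := by
  intro A _ hpre
  unfold Spec_F F F_alt
  have hstep : (fun (pocet j : Int) =>
      ((PySem.List.pyRange 0 (PySem.List.len A) 1).foldl
        (fun (st : Int × Int) i =>
          let pocet_nul := if PySem.List.pyGetD (PySem.List.pyGetD A i []) j 0 = 0 then st.2 + 1 else st.2
          let pocet' := if pocet_nul = PySem.List.len A then st.1 + 1 else st.1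
          (pocet', pocet_nul))
        (pocet, 0)).1) =
      fun (c j : Int) => if (A.all fun row => PySem.List.pyGetD row j 0 == 0) then c + 1 else c := by
    funext p j
    exact step_eq A hpre.1 p j
  rw [hstep, count_fold_eq, filter_fold_eq]
  simp [PySem.List.len_eq]
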